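-- pv_equiv track=rewrite | github.com/cgtrai/amiagi | src/amiagi/application/discussion_sync.py | extract_dialogue_without_code
-- ===== SOURCE A (Python) =====
-- def extract_dialogue_without_code(markdown_text: str) -> str:
--     lines = markdown_text.splitlines()
--     in_fenced_code = False
--     output: list[str] = []
--
--     for line in lines:
--         stripped = line.strip()
--
--         if stripped.startswith("```"):
--             in_fenced_code = not in_fenced_code
--             continue
--
--         if in_fenced_code:
--             continue
--
--         output.append(line)
--
--     cleaned = "\n".join(output)
--     compact_lines = [line.rstrip() for line in cleaned.splitlines()]
--     while compact_lines and not compact_lines[-1]: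
--         compact_lines.pop()
--     return "\n".join(compact_lines).strip()
-- ===== SOURCE B (Python) =====
-- def extract_dialogue_without_code(markdown_text: str) -> str:
--     lines = markdown_text.splitlines()
--
--     # Pass 1: indices of fence lines; an unclosed final fence is paired with the end.
--     fences = [i for i, line in enumerate(lines) if line.strip().startswith("```")]
--     if len(fences) % 2 == 1:
--         fences.append(len(lines))
--
--     # Pass 2: keep only the segments between code blocks (fence lines excluded).
--     kept = []
--     prev = 0
--     for j in range(0, len(fences), 2):
--         kept.extend(lines[prev:fences[j]])
--         prev = fences[j + 1] + 1
--     kept.extend(lines[prev:])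
--
--     kept = [line.rstrip() for line in kept]
--     while kept and not kept[-1]:
--         kept.pop()
--     return "\n".join(kept).strip()
-- ===== Notes on version B (the rewrite author's own statement) =====
-- stated objective: alternative
-- what changed: Replaces A's single stateful scan with a toggled in_fenced_code flag by two passes: collect the indices of fence lines, pair them up (an unclosed last fence pairs with the end), and keep the alternating non-code segments by slicing; same trailing cleanup.
import Mathlib
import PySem

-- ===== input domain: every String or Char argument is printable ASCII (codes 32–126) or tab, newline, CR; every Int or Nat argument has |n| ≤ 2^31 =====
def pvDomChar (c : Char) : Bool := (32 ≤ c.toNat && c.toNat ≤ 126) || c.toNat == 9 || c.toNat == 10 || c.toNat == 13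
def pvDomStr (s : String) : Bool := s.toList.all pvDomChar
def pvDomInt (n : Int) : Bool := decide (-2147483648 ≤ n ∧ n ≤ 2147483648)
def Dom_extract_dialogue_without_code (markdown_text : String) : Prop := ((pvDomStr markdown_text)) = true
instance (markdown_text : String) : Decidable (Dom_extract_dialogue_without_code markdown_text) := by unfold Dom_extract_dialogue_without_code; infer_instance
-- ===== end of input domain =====

-- B replaces A's stateful fence-parity scan by two passes: collect fence-line indices,
-- then keep the alternating non-code segments by slicing; same trailing cleanup (objective: alternative).

-- ===== PORT A =====
-- the `while compact_lines and not compact_lines[-1]: compact_lines.pop()` loop: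
-- drop empty strings from the end (shared verbatim by both Pythons)
def popTrailing (l : List String) : List String :=
  (l.reverse.dropWhile (fun s => s == "")).reverse

def extract_dialogue_without_code (markdown_text : String) : String :=
  let lines := PySem.Str.splitlines markdown_text
  let res := lines.foldl
    (fun (st : Bool × List String) line =>
      let stripped := PySem.Str.strip line
      if PySem.Str.startswith stripped "```" then (!st.1, st.2)
      else if st.1 then st
      else (st.1, st.2 ++ [line]))
    (false, [])
  let cleaned := PySem.Str.join "\n" res.2
  let compact := (PySem.Str.splitlines cleaned).map PySem.Str.rstrip
  PySem.Str.strip (PySem.Str.join "\n" (popTrailing compact))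

-- ===== PORT B =====
-- the `for j in range(0, len(fences), 2)` slicing loop of Source B, two fence indices at a time
def keptSegs (lines : List String) : Int → List Int → List String
  | prev, [] => PySem.List.slice lines (some prev) none
  | prev, [f] => PySem.List.slice lines (some prev) (some f)  -- unreachable: fences list has even length
  | prev, f1 :: f2 :: rest => PySem.List.slice lines (some prev) (some f1) ++ keptSegs lines (f2 + 1) rest

def extract_dialogue_without_code_alt (markdown_text : String) : String :=
  let lines := PySem.Str.splitlines markdown_text
  let fences := ((PySem.List.enumerate lines 0).filter
      (fun p => PySem.Str.startswith (PySem.Str.strip p.2) "```")).map (fun p => p.1)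
  let fences := if fences.length % 2 == 1 then fences ++ [(lines.length : Int)] else fences
  let kept := (keptSegs lines 0 fences).map PySem.Str.rstrip
  PySem.Str.strip (PySem.Str.join "\n" (popTrailing kept))

-- ===== PRECONDITION & SPEC =====
def Spec_extract_dialogue_without_code (markdown_text : String) (out : String) : Prop := out = extract_dialogue_without_code_alt markdown_text
instance (markdown_text : String) (out : String) : Decidable (Spec_extract_dialogue_without_code markdown_text out) := by unfold Spec_extract_dialogue_without_code; infer_instance

-- ===== CLAIM (what is proved, stated in full; the proofs are below) =====
def Claim_equal_extract_dialogue_without_code : Prop := ∀ (markdown_text : String), Dom_extract_dialogue_without_code markdown_text → Spec_extract_dialogue_without_code markdown_text (extract_dialogue_without_code markdown_text)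

-- ===== LEMMAS AND PROOFS =====

-- fence-line test, abbreviated for the proofs
def pvF (l : String) : Bool := PySem.Str.startswith (PySem.Str.strip l) "```"

-- the list A's scan keeps, as a structural recursion over the lines with the parity bit
def foldAB : Bool → List String → List String
  | _, [] => []
  | b, l :: ls => if pvF l then foldAB (!b) ls else if b then foldAB b ls else l :: foldAB b ls

-- indices (base 0) of the fence lines
def fidx : List String → List Nat
  | [] => []
  | l :: ls => if pvF l then 0 :: (fidx ls).map (· + 1) else (fidx ls).map (· + 1)

-- Nat-index version of keptSegs
def keptN (lines : List String) : Nat → List Nat → List String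
  | prev, [] => lines.drop prev
  | prev, [f] => (lines.drop prev).take (f - prev)
  | prev, f1 :: f2 :: rest => (lines.drop prev).take (f1 - prev) ++ keptN lines (f2 + 1) rest

def padN (F : List Nat) (n : Nat) : List Nat := if F.length % 2 = 1 then F ++ [n] else F
def padT (F : List Nat) (n : Nat) : List Nat := if F.length % 2 = 0 then F ++ [n] else F

def skipSel (lines : List String) : List Nat → List String
  | [] => []
  | f :: rest => keptN lines (f + 1) rest

theorem foldA_eq (ls : List String) : ∀ (b : Bool) (acc : List String),
    (ls.foldl (fun (st : Bool × List String) line =>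
      if PySem.Str.startswith (PySem.Str.strip line) "```" then (!st.1, st.2)
      else if st.1 then st
      else (st.1, st.2 ++ [line])) (b, acc)).2 = acc ++ foldAB b ls := by
  induction ls with
  | nil => intro b acc; simp [foldAB]
  | cons l ls ih =>
    intro b acc
    by_cases h : pvF l
    · simp only [List.foldl_cons]
      have h' := h; unfold pvF at h'
      simp only [h', if_pos rfl, foldAB, h, if_pos rfl]
      exact ih (!b) acc
    · have h' := h; unfold pvF at h'
      cases b with
      | false =>
        simp only [List.foldl_cons, h', if_neg, foldAB, h]
        simp only [Bool.false_eq_true, if_false]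
        rw [ih false (acc ++ [l])]
        simp [foldAB, h]
      | true =>
        simp only [List.foldl_cons, h', foldAB, h]
        simp only [Bool.false_eq_true, if_false, if_true]
        exact ih true acc


theorem enum_fidx (ls : List String) : ∀ (s : Int),
    (((PySem.List.enumerate ls s).filter
      (fun p => PySem.Str.startswith (PySem.Str.strip p.2) "```")).map (fun p => p.1))
      = (fidx ls).map (fun (n : Nat) => s + (n : Int)) := by
  induction ls with
  | nil => intro s; simp [PySem.List.enumerate_nil, fidx]
  | cons l ls ih =>
    intro s
    rw [PySem.List.enumerate_cons]
    have hfun : ((fun (n : Nat) => s + (n : Int)) ∘ (fun (n : Nat) => n + 1))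
        = fun (n : Nat) => (s + 1) + (n : Int) := by
      funext n; simp only [Function.comp_apply]; push_cast; ring
    by_cases h : pvF l
    · have h' := h; unfold pvF at h'
      simp only [List.filter_cons, h', List.map_cons, fidx, h, if_true]
      rw [ih (s + 1), List.map_map, hfun]
      simp
    · have h' := h; unfold pvF at h'
      simp only [List.filter_cons, h', Bool.false_eq_true, if_false, fidx, h]
      rw [ih (s + 1), List.map_map, hfun]

theorem keptSegs_eq_keptN (lines : List String) : ∀ (F : List Nat) (prev : Nat),
    keptSegs lines (prev : Int) (F.map (fun (n : Nat) => (n : Int))) = keptN lines prev F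
  | [], prev => by simp [keptSegs, keptN, PySem.List.slice_from]
  | [f], prev => by
    simp only [List.map_cons, List.map_nil, keptSegs, keptN, PySem.List.slice_natCast]
  | f1 :: f2 :: rest, prev => by
    simp only [List.map_cons, keptSegs, keptN]
    congr 1
    · simp [PySem.List.slice_natCast]
    · have h : ((f2 : Int) + 1) = ((f2 + 1 : Nat) : Int) := by push_cast; ring
      rw [h, keptSegs_eq_keptN lines rest (f2 + 1)]

theorem keptN_shift (l : String) (ls : List String) : ∀ (F : List Nat) (p : Nat),
    keptN (l :: ls) (p + 1) (F.map (· + 1)) = keptN ls p F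
  | [], p => by simp [keptN]
  | [f], p => by simp [keptN, Nat.succ_sub_succ]
  | f1 :: f2 :: rest, p => by
    simp only [List.map_cons, keptN, Nat.succ_sub_succ, List.drop_succ_cons]
    rw [keptN_shift l ls rest (f2 + 1)]

theorem keptN_head (l : String) (ls : List String) : ∀ (F : List Nat),
    keptN (l :: ls) 0 (F.map (· + 1)) = l :: keptN ls 0 F
  | [] => by simp [keptN]
  | [f] => by simp [keptN, List.take_succ_cons]
  | f1 :: f2 :: rest => by
    simp only [List.map_cons, keptN, List.drop_zero, Nat.sub_zero, List.take_succ_cons,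
      List.cons_append]
    rw [keptN_shift l ls rest (f2 + 1)]

theorem padT_ne_nil (F : List Nat) (n : Nat) : padT F n ≠ [] := by
  unfold padT
  split
  · simp
  · rename_i h
    intro hF
    rw [hF] at h
    simp at h

theorem padN_cons0 (F : List Nat) (n : Nat) :
    padN (0 :: F.map (· + 1)) (n + 1) = 0 :: (padT F n).map (· + 1) := by
  unfold padN padT
  have hl : (0 :: F.map (· + 1)).length = F.length + 1 := by simp
  by_cases h : F.length % 2 = 0
  · rw [if_pos (by simp [hl]; omega), if_pos h]
    simp
  · rw [if_neg (by simp [hl]; omega), if_neg h]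

theorem padT_cons0 (F : List Nat) (n : Nat) :
    padT (0 :: F.map (· + 1)) (n + 1) = 0 :: (padN F n).map (· + 1) := by
  unfold padN padT
  have hl : (0 :: F.map (· + 1)).length = F.length + 1 := by simp
  by_cases h : F.length % 2 = 1
  · rw [if_pos (by simp [hl]; omega), if_pos h]
    simp
  · rw [if_neg (by simp [hl]; omega), if_neg h]

theorem padN_shift (F : List Nat) (n : Nat) :
    padN (F.map (· + 1)) (n + 1) = (padN F n).map (· + 1) := by
  unfold padN
  by_cases h : F.length % 2 = 1
  · rw [if_pos (by simpa using h), if_pos h]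
    simp
  · rw [if_neg (by simpa using h), if_neg h]

theorem padT_shift (F : List Nat) (n : Nat) :
    padT (F.map (· + 1)) (n + 1) = (padT F n).map (· + 1) := by
  unfold padT
  by_cases h : F.length % 2 = 0
  · rw [if_pos (by simpa using h), if_pos h]
    simp
  · rw [if_neg (by simpa using h), if_neg h]

theorem mainSel (ls : List String) :
    keptN ls 0 (padN (fidx ls) ls.length) = foldAB false ls ∧
    skipSel ls (padT (fidx ls) ls.length) = foldAB true ls := by
  induction ls with
  | nil =>
    constructor
    · simp [fidx, padN, keptN, foldAB]
    · simp [fidx, padT, skipSel, keptN, foldAB]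
  | cons l ls ih =>
    have hlen : (l :: ls).length = ls.length + 1 := rfl
    by_cases h : pvF l
    · have hfx : fidx (l :: ls) = 0 :: (fidx ls).map (· + 1) := by simp [fidx, h]
      constructor
      · rw [hlen, hfx, padN_cons0]
        obtain ⟨p1, rest, hP⟩ : ∃ p1 rest, padT (fidx ls) ls.length = p1 :: rest := by
          rcases hpt : padT (fidx ls) ls.length with _ | ⟨p1, rest⟩
          · exact absurd hpt (padT_ne_nil _ _)
          · exact ⟨p1, rest, rfl⟩
        rw [hP]
        simp only [List.map_cons, keptN, List.drop_zero, Nat.sub_zero, List.take_zero,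
          List.nil_append]
        rw [keptN_shift l ls rest (p1 + 1)]
        have h2 := ih.2
        rw [hP] at h2
        simp only [skipSel] at h2
        rw [h2]
        simp [foldAB, h]
      · rw [hlen, hfx, padT_cons0]
        simp only [skipSel, Nat.zero_add]
        have hz : (1 : Nat) = 0 + 1 := rfl
        rw [hz, keptN_shift l ls (padN (fidx ls) ls.length) 0, ih.1]
        simp [foldAB, h]
    · have hfx : fidx (l :: ls) = (fidx ls).map (· + 1) := by simp [fidx, h]
      constructor
      · rw [hlen, hfx, padN_shift, keptN_head, ih.1]
        simp [foldAB, h]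
      · rw [hlen, hfx, padT_shift]
        obtain ⟨p1, rest, hP⟩ : ∃ p1 rest, padT (fidx ls) ls.length = p1 :: rest := by
          rcases hpt : padT (fidx ls) ls.length with _ | ⟨p1, rest⟩
          · exact absurd hpt (padT_ne_nil _ _)
          · exact ⟨p1, rest, rfl⟩
        rw [hP]
        simp only [List.map_cons, skipSel]
        rw [keptN_shift l ls rest (p1 + 1)]
        have h2 := ih.2
        rw [hP] at h2
        simp only [skipSel] at h2
        rw [h2]
        simp [foldAB, h]

-- ---- splitlines / join roundtrip ----

-- the break-character test hard-wired in PySem.Chars.splitlines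
def pvIsB (c : Char) : Bool :=
  c.toNat = 10 || c.toNat = 13 || c.toNat = 11 || c.toNat = 12 || c.toNat = 28 || c.toNat = 29 ||
  c.toNat = 30 || c.toNat = 133 || c.toNat = 8232 || c.toNat = 8233

-- "contains no line-break character"
def pvBF (p : List Char) : Prop := ∀ c ∈ p, pvIsB c = false

theorem splitlines_eq_go (s : List Char) :
    PySem.Chars.splitlines s = PySem.Chars.splitlines.go pvIsB s [] [] := rfl

theorem go_nil (cur : List Char) (acc : List (List Char)) :
    PySem.Chars.splitlines.go pvIsB [] cur acc
      = if cur.isEmpty then acc.reverse else (cur.reverse :: acc).reverse := by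
  rw [PySem.Chars.splitlines.go.eq_def]

theorem go_crlf (rest cur : List Char) (acc : List (List Char)) :
    PySem.Chars.splitlines.go pvIsB ('\r' :: '\n' :: rest) cur acc
      = PySem.Chars.splitlines.go pvIsB rest [] (cur.reverse :: acc) := by
  rw [PySem.Chars.splitlines.go.eq_def]
  rfl

theorem go_break (c : Char) (hc : pvIsB c = true)
    (rest cur : List Char) (acc : List (List Char))
    (hne : ∀ rest', c = '\r' → rest = '\n' :: rest' → False) :
    PySem.Chars.splitlines.go pvIsB (c :: rest) cur acc
      = PySem.Chars.splitlines.go pvIsB rest [] (cur.reverse :: acc) := by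
  rw [PySem.Chars.splitlines.go.eq_def]
  split
  · rename_i heq; cases heq
  · rename_i heq; cases heq; exact (hne _ rfl rfl).elim
  · rename_i c' r' hne' heq; cases heq; rw [if_pos hc]

theorem go_char (c : Char) (hc : pvIsB c = false)
    (rest cur : List Char) (acc : List (List Char)) :
    PySem.Chars.splitlines.go pvIsB (c :: rest) cur acc
      = PySem.Chars.splitlines.go pvIsB rest (c :: cur) acc := by
  have hr : c ≠ '\r' := by rintro rfl; simp [pvIsB] at hc
  rw [PySem.Chars.splitlines.go.eq_def]
  split
  · rename_i heq; cases heq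
  · rename_i heq; cases heq; exact absurd rfl hr
  · rename_i c' r' hne heq; cases heq; rw [if_neg (by simp [hc])]

theorem go_acc (s cur : List Char) (acc : List (List Char)) :
    PySem.Chars.splitlines.go pvIsB s cur acc
      = acc.reverse ++ PySem.Chars.splitlines.go pvIsB s cur [] := by
  have H := PySem.Chars.splitlines.go.induct pvIsB
    (motive := fun s cur _ => ∀ acc, PySem.Chars.splitlines.go pvIsB s cur acc
      = acc.reverse ++ PySem.Chars.splitlines.go pvIsB s cur [])
    ?_ ?_ ?_ ?_ ?_ s cur []
  · exact H acc
  · intro cur acc0 hcur acc; rw [go_nil, go_nil, if_pos hcur, if_pos hcur]; simp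
  · intro cur acc0 hcur acc
    rw [go_nil, go_nil, if_neg hcur, if_neg hcur]; simp
  · intro rest cur acc0 ih acc
    rw [go_crlf, go_crlf, ih (cur.reverse :: acc), ih [cur.reverse]]; simp
  · intro c rest cur acc0 hne hc ih acc
    rw [go_break c hc rest cur acc (fun r h1 h2 => hne r h1 h2),
        go_break c hc rest cur [] (fun r h1 h2 => hne r h1 h2),
        ih (cur.reverse :: acc), ih [cur.reverse]]; simp
  · intro c rest cur acc0 hne hc ih acc
    rw [go_char c (by simpa using hc), go_char c (by simpa using hc), ih acc]

theorem go_app : ∀ (p : List Char), pvBF p → ∀ (s cur : List Char) (acc : List (List Char)),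
    PySem.Chars.splitlines.go pvIsB (p ++ s) cur acc
      = PySem.Chars.splitlines.go pvIsB s (p.reverse ++ cur) acc
  | [], _ => by intro s cur acc; simp
  | c :: p', hp => by
    intro s cur acc
    have hc : pvIsB c = false := hp c (by simp)
    rw [List.cons_append, go_char c hc,
      go_app p' (fun d hd => hp d (by simp [hd])) s (c :: cur) acc]
    simp

theorem go_bf (s cur : List Char) (acc : List (List Char)) :
    (∀ a ∈ acc, pvBF a) → pvBF cur → ∀ q ∈ PySem.Chars.splitlines.go pvIsB s cur acc, pvBF q := by
  induction s, cur, acc using PySem.Chars.splitlines.go.induct (isB := pvIsB) with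
  | case1 cur acc h =>
    rw [go_nil, if_pos h]
    intro hacc _ q hq
    exact hacc q (by simpa using hq)
  | case2 cur acc h =>
    rw [go_nil, if_neg h]
    intro hacc hcur q hq
    rw [List.mem_reverse] at hq
    rcases List.mem_cons.mp hq with rfl | hq'
    · intro d hd; exact hcur d (List.mem_reverse.mp hd)
    · exact hacc q hq'
  | case3 rest cur acc ih =>
    rw [go_crlf]
    intro hacc hcur
    refine ih ?_ ?_
    · intro a ha
      rcases List.mem_cons.mp ha with rfl | ha'
      · intro d hd; exact hcur d (List.mem_reverse.mp hd)
      · exact hacc a ha'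
    · intro d hd; cases hd
  | case4 c rest cur acc hne hc ih =>
    rw [go_break c hc rest cur acc hne]
    intro hacc hcur
    refine ih ?_ ?_
    · intro a ha
      rcases List.mem_cons.mp ha with rfl | ha'
      · intro d hd; exact hcur d (List.mem_reverse.mp hd)
      · exact hacc a ha'
    · intro d hd; cases hd
  | case5 c rest cur acc hne hc ih =>
    rw [go_char c (by simpa using hc)]
    intro hacc hcur
    refine ih hacc ?_
    intro d hd
    rcases List.mem_cons.mp hd with rfl | hd'
    · simpa using hc
    · exact hcur d hd'

theorem splitlines_bf (s : List Char) : ∀ q ∈ PySem.Chars.splitlines s, pvBF q := by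
  intro q hq
  rw [splitlines_eq_go] at hq
  exact go_bf s [] [] (by intro a ha; cases ha) (by intro d hd; cases hd) q hq

theorem join_cc (a b : List Char) (l : List (List Char)) :
    PySem.Chars.join ['\n'] (a :: b :: l) = a ++ '\n' :: PySem.Chars.join ['\n'] (b :: l) := by
  simp [PySem.Chars.join, List.intercalate, List.intersperse]

theorem join_nil' : PySem.Chars.join ['\n'] ([] : List (List Char)) = [] := by
  simp [PySem.Chars.join, List.intercalate, List.intersperse]

theorem join_sing (p : List Char) : PySem.Chars.join ['\n'] [p] = p := by
  simp [PySem.Chars.join, List.intercalate, List.intersperse]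

-- drop a single trailing empty piece (what "\n".join(...).splitlines() loses)
def dropLE : List (List Char) → List (List Char)
  | [] => []
  | [p] => if p = [] then [] else [p]
  | p :: q :: rest => p :: dropLE (q :: rest)

theorem join_splitlines : ∀ (P : List (List Char)), (∀ p ∈ P, pvBF p) →
    PySem.Chars.splitlines (PySem.Chars.join ['\n'] P) = dropLE P
  | [], _ => by
    rw [join_nil', splitlines_eq_go, go_nil]
    simp [dropLE]
  | [p], h => by
    rw [join_sing, splitlines_eq_go, dropLE]
    conv_lhs => rw [← List.append_nil p]
    rw [go_app p (h p (by simp)) [] [] [], go_nil]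
    by_cases hp : p = []
    · simp [hp]
    · rw [if_neg (by simp [hp]), if_neg (by simp [hp])]
      simp
  | p :: q :: rest, h => by
    rw [join_cc, splitlines_eq_go,
      go_app p (h p (by simp)) _ [] [],
      go_break '\n' (by decide) _ _ _ (fun r h1 h2 => by cases h1),
      go_acc, ← splitlines_eq_go,
      join_splitlines (q :: rest) (fun a ha => h a (by simp [ha]))]
    simp [dropLE]

def dropLES : List String → List String
  | [] => []
  | [p] => if p = "" then [] else [p]
  | p :: q :: rest => p :: dropLES (q :: rest)

theorem toList_eq_nil_iff (p : String) : p.toList = [] ↔ p = "" := by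
  constructor
  · intro h
    have := congrArg String.ofList h
    simpa [String.ofList_toList] using this
  · rintro rfl; rfl

theorem dropLE_map : ∀ (P : List String),
    (dropLE (P.map String.toList)).map String.ofList = dropLES P
  | [] => rfl
  | [p] => by
    by_cases hp : p = ""
    · simp [dropLE, dropLES, hp]
    · rw [List.map_cons, List.map_nil, dropLE, dropLES,
        if_neg (fun h => hp ((toList_eq_nil_iff p).mp h)), if_neg hp]
      simp [String.ofList_toList]
  | p :: q :: rest => by
    simp only [List.map_cons, dropLE, dropLES]
    have h := dropLE_map (q :: rest)
    simp only [List.map_cons] at h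
    rw [h]
    simp [String.ofList_toList]

theorem dropLES_eq : ∀ (P : List String),
    dropLES P = if P.getLast? = some "" then P.dropLast else P
  | [] => by simp [dropLES]
  | [p] => by
    by_cases hp : p = "" <;> simp [dropLES, hp]
  | p :: q :: rest => by
    rw [dropLES, dropLES_eq (q :: rest)]
    by_cases h : (q :: rest).getLast? = some ""
    · rw [if_pos h, if_pos (by simpa using h)]
      simp
    · rw [if_neg h, if_neg (by simpa using h)]

theorem rstrip_empty : PySem.Str.rstrip "" = "" := by decide

theorem popTrailing_concat_empty (l : List String) :
    popTrailing (l ++ [""]) = popTrailing l := by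
  simp [popTrailing]

theorem popTrailing_dropLES (P : List String) :
    popTrailing ((dropLES P).map PySem.Str.rstrip) = popTrailing (P.map PySem.Str.rstrip) := by
  rw [dropLES_eq]
  by_cases h : P.getLast? = some ""
  · rw [if_pos h]
    obtain ⟨l', rfl⟩ : ∃ l', P = l' ++ [""] := by
      rcases List.getLast?_eq_some_iff.mp h with ⟨l', hl⟩
      exact ⟨l', hl⟩
    rw [List.dropLast_concat]
    rw [List.map_append, List.map_cons, List.map_nil, rstrip_empty, popTrailing_concat_empty]
  · rw [if_neg h]

theorem foldAB_subset : ∀ (ls : List String) (b : Bool) (q : String), q ∈ foldAB b ls → q ∈ ls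
  | [], b, q => by intro h; simp [foldAB] at h
  | l :: ls, b, q => by
    intro h
    simp only [foldAB] at h
    split_ifs at h with h1 h2
    · exact List.mem_cons_of_mem l (foldAB_subset ls (!b) q h)
    · exact List.mem_cons_of_mem l (foldAB_subset ls b q h)
    · rcases List.mem_cons.mp h with rfl | h'
      · exact List.mem_cons_self
      · exact List.mem_cons_of_mem l (foldAB_subset ls b q h')

-- A's join-then-resplit equals the line list with one trailing empty line dropped
theorem compact_eq (md : String) (out : List String) (hout : ∀ q ∈ out, q ∈ PySem.Str.splitlines md) :
    PySem.Str.splitlines (PySem.Str.join "\n" out) = dropLES out := by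
  have hbf : ∀ p ∈ out.map String.toList, pvBF p := by
    intro p hp
    rcases List.mem_map.mp hp with ⟨q, hq, rfl⟩
    have hq' : q.toList ∈ List.map String.toList (PySem.Str.splitlines md) :=
      List.mem_map_of_mem (hout q hq)
    rw [PySem.Str.splitlines_map_toList] at hq'
    exact splitlines_bf md.toList q.toList hq'
  unfold PySem.Str.splitlines
  rw [PySem.Str.toList_join]
  have hsep : ("\n" : String).toList = ['\n'] := rfl
  rw [hsep, join_splitlines (out.map String.toList) hbf, dropLE_map]

-- ===== VERDICT (by name: the statement is the Claim_ definition above) =====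
theorem extract_dialogue_without_code_spec : Claim_equal_extract_dialogue_without_code := by
  intro md _
  unfold Spec_extract_dialogue_without_code
  have hA : extract_dialogue_without_code md =
      PySem.Str.strip (PySem.Str.join "\n" (popTrailing
        ((PySem.Str.splitlines (PySem.Str.join "\n"
          (foldAB false (PySem.Str.splitlines md)))).map PySem.Str.rstrip))) := by
    simp only [extract_dialogue_without_code]
    rw [foldA_eq, List.nil_append]
  have hB : extract_dialogue_without_code_alt md =
      PySem.Str.strip (PySem.Str.join "\n" (popTrailing
        ((foldAB false (PySem.Str.splitlines md)).map PySem.Str.rstrip))) := by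
    simp only [extract_dialogue_without_code_alt]
    rw [enum_fidx]
    have h0 : ((fidx (PySem.Str.splitlines md)).map (fun (n : Nat) => (0 : Int) + (n : Int)))
        = (fidx (PySem.Str.splitlines md)).map (fun (n : Nat) => (n : Int)) := by
      apply List.map_congr_left; intro n _; ring
    rw [h0]
    have hpad : ∀ (F : List Nat) (n : Nat),
        (if ((F.map (fun (k : Nat) => (k : Int))).length % 2 == 1)
          then F.map (fun (k : Nat) => (k : Int)) ++ [(n : Int)]
          else F.map (fun (k : Nat) => (k : Int)))
        = (padN F n).map (fun (k : Nat) => (k : Int)) := by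
      intro F n
      by_cases h : F.length % 2 = 1 <;> simp [padN, h]
    rw [hpad]
    have h02 : (0 : Int) = ((0 : Nat) : Int) := rfl
    rw [h02, keptSegs_eq_keptN, (mainSel (PySem.Str.splitlines md)).1]
  rw [hA, hB,
    compact_eq md (foldAB false (PySem.Str.splitlines md))
      (fun q hq => foldAB_subset _ false q hq),
    popTrailing_dropLES]
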